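-- pv_equiv track=rewrite | github.com/der-amit/python_prac | enumerate.py | dist_between_sevens
-- ===== SOURCE A (Python) =====
-- def dist_between_sevens(nums):
--     loc_first_seven = -1
--     for i, n in enumerate(nums):
--         if n == 7:
--             if loc_first_seven == -1:
--                 loc_first_seven = i
--             else:
--                 return i - loc_first_seven
-- ===== SOURCE B (Python) =====
-- def dist_between_sevens(nums):
--     positions = [i for i, n in enumerate(nums) if n == 7]
--     if len(positions) >= 2:
--         return positions[1] - positions[0]
-- ===== Notes on version B (the rewrite author's own statement) =====
-- stated objective: simpler
-- what changed: Replaces the early-exiting loop with a -1 sentinel index by collecting all indices of 7 in one comprehension and subtracting the first two.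
import Mathlib
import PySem

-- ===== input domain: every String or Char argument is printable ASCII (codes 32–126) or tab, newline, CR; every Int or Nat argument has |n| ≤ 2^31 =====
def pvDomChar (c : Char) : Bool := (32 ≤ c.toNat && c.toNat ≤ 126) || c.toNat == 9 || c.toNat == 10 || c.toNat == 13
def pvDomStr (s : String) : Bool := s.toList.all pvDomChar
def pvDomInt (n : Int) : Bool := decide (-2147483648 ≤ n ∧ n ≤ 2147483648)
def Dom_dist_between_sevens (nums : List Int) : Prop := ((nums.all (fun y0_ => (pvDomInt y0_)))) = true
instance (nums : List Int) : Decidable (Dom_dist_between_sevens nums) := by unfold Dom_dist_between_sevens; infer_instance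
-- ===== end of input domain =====

-- B collects all indices of 7 then subtracts the first two; equivalence proved on all inputs.

-- ===== PORT A =====
-- A's loop: index i, sentinel loc_first_seven (-1 = not seen), early return on the second 7.
def distSevensLoopA : List Int → Int → Int → Option Int
  | [], _, _ => none
  | n :: t, i, loc =>
    if n == 7 then
      if loc == -1 then distSevensLoopA t (i + 1) i
      else some (i - loc)
    else distSevensLoopA t (i + 1) loc

def dist_between_sevens (nums : List Int) : Option Int :=
  distSevensLoopA nums 0 (-1)

-- ===== PORT B =====
-- positions = [i for i, n in enumerate(nums) if n == 7]
def sevenPositions : List Int → Int → List Int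
  | [], _ => []
  | n :: t, i => if n == 7 then i :: sevenPositions t (i + 1) else sevenPositions t (i + 1)

def dist_between_sevens_alt (nums : List Int) : Option Int :=
  match sevenPositions nums 0 with
  | p0 :: p1 :: _ => some (p1 - p0)
  | _ => none

-- ===== PRECONDITION & SPEC =====
def Spec_dist_between_sevens (nums : List Int) (out : Option Int) : Prop := out = dist_between_sevens_alt nums
instance (nums : List Int) (out : Option Int) : Decidable (Spec_dist_between_sevens nums out) := by unfold Spec_dist_between_sevens; infer_instance

-- ===== CLAIM (what is proved, stated in full; the proofs are below) =====
def Claim_equal_dist_between_sevens : Prop := ∀ (nums : List Int), Dom_dist_between_sevens nums → Spec_dist_between_sevens nums (dist_between_sevens nums)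

-- ===== LEMMAS AND PROOFS =====

-- After the first 7 was seen at index loc (so loc ≥ 0 ≠ -1), A returns (first position − loc).
theorem loopA_found (t : List Int) : ∀ (i loc : Int), loc ≠ -1 →
    distSevensLoopA t i loc =
      (match sevenPositions t i with
       | p :: _ => some (p - loc)
       | [] => none) := by
  induction t with
  | nil => intro i loc _; rfl
  | cons n t ih =>
    intro i loc hloc
    by_cases h : n = 7
    · simp [distSevensLoopA, sevenPositions, h, hloc]
    · simp [distSevensLoopA, sevenPositions, h, ih _ loc hloc]

-- Before any 7 was seen, A's result matches B's collect-then-subtract.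
theorem loopA_search (t : List Int) : ∀ (i : Int), 0 ≤ i →
    distSevensLoopA t i (-1) =
      (match sevenPositions t i with
       | p0 :: p1 :: _ => some (p1 - p0)
       | _ => none) := by
  induction t with
  | nil => intro i _; rfl
  | cons n t ih =>
    intro i hi
    by_cases h : n = 7
    · have hne : i ≠ -1 := by omega
      simp only [distSevensLoopA, sevenPositions, h, if_pos, beq_self_eq_true,
        loopA_found t (i + 1) i hne]
      cases sevenPositions t (i + 1) <;> rfl
    · simp [distSevensLoopA, sevenPositions, h, ih (i + 1) (by omega)]

-- ===== VERDICT (by name: the statement is the Claim_ definition above) =====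
theorem dist_between_sevens_spec : Claim_equal_dist_between_sevens := by
  intro nums _
  unfold Spec_dist_between_sevens dist_between_sevens dist_between_sevens_alt
  exact loopA_search nums 0 (by omega)
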